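-- pv_equiv track=rewrite | github.com/shket-228/testovoe-tetrika | task1.py | task
-- ===== SOURCE A (Python) =====
-- def task(array):
--     # Edge cases
--     if not array or array[len(array) - 1] == "1":
--         return -1  # Empty or have no 0
--     if array[0] == "0":
--         return 0  # Starts with 0
--
--     # Binary search
--     left, right = 0, len(array) - 1
--     while True:
--         mid = (left + right) // 2
--         if array[mid] == "0":
--             right = mid
--         elif array[mid + 1] == "1":
--             left = mid
--         else:
--             return mid + 1
-- ===== SOURCE B (Python) =====
-- def task(array):
--     n = len(array)
--     if n == 0 or array[-1] == "1":
--         return -1  # Empty or have no 0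
--     if array[0] == "0":
--         return 0  # Starts with 0
--
--     # Recursive divide-and-conquer on (left, width): the interval [left, left+width],
--     # probing at left + width//2.  Same probe sequence as a (left, right) binary search.
--     def search(left, width):
--         half = width // 2
--         probe = left + half
--         if array[probe] == "0":
--             return search(left, half)
--         if array[probe + 1] == "1":
--             return search(probe, width - half)
--         return probe + 1
--
--     return search(0, n - 1)
-- ===== Notes on version B (the rewrite author's own statement) =====
-- stated objective: alternative
-- what changed: A's unbounded while-True loop mutating (left, right) is replaced by a recursive helper search(left, width) over an interval represented by its left end and width, with half-width arithmetic (probe = left + width//2, new widths half and width-half) instead of midpoint recomputation from two endpoints.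
import Mathlib
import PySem

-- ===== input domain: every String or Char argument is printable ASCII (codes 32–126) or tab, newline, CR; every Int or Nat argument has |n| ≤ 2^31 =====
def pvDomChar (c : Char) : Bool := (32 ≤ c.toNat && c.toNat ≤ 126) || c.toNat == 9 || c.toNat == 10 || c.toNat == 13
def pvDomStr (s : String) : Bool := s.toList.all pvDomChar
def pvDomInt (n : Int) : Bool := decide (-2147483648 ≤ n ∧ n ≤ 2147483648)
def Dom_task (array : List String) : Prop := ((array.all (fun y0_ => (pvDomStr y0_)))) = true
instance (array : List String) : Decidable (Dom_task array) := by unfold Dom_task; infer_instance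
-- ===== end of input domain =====

-- B replaces A's unbounded while-True loop over endpoints (left, right) by a recursive
-- divide-and-conquer helper over (left, width) with half-width arithmetic (objective:
-- alternative decomposition/state representation, same cost).


-- ===== PORT A =====
-- One iteration of A's `while True` body: state is `inl (left, right)` while looping,
-- `inr result` once the `return mid + 1` fired.
def taskStep (array : List String) (s : (Int × Int) ⊕ Int) : (Int × Int) ⊕ Int :=
  match s with
  | Sum.inr res => Sum.inr res
  | Sum.inl (left, right) =>
    let mid := PySem.Int.floordiv (left + right) 2
    if PySem.List.pyGet? array mid = some "0" then Sum.inl (left, mid)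
    else if PySem.List.pyGet? array (mid + 1) = some "1" then Sum.inl (mid, right)
    else Sum.inr (mid + 1)

-- A's loop, encoded as the step function folded over a fuel of `array.length` iterations
-- (enough for every input on which the Python loop returns; leftover `inl` yields a junk 0,
-- reachable only outside Pre_task).
def task (array : List String) : Int :=
  if array = [] ∨ PySem.List.pyGet? array ((array.length : Int) - 1) = some "1" then -1
  else if PySem.List.pyGet? array 0 = some "0" then 0
  else
    match (List.range array.length).foldl (fun s _ => taskStep array s)
        (Sum.inl (0, (array.length : Int) - 1)) with
    | Sum.inr res => res
    | Sum.inl _ => 0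

-- ===== PORT B =====
-- B's recursive helper `search(left, width)`; fuel bounds the recursion depth (Python's
-- recursion returns within `array.length` calls on every input admitted by Pre_task).
def taskSearch (array : List String) : Nat → Int → Nat → Int
  | 0, _, _ => 0
  | Nat.succ fuel, left, width =>
    let half := width / 2
    let probe := left + (half : Int)
    if PySem.List.pyGet? array probe = some "0" then taskSearch array fuel left half
    else if PySem.List.pyGet? array (probe + 1) = some "1" then
      taskSearch array fuel probe (width - half)
    else probe + 1

def task_alt (array : List String) : Int :=
  if array.length = 0 ∨ PySem.List.pyGet? array (-1) = some "1" then -1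
  else if PySem.List.pyGet? array 0 = some "0" then 0
  else taskSearch array array.length 0 (array.length - 1)

-- ===== PRECONDITION & SPEC =====
-- Pre_ excludes exactly the length-1 arrays whose element is neither "1" nor "0": there the
-- guards fall through and `array[probe + 1]` raises IndexError in A (and in B alike).
def Pre_task (array : List String) : Prop :=
  array.length = 1 → (array = ["1"] ∨ array = ["0"])
instance (array : List String) : Decidable (Pre_task array) := by unfold Pre_task; infer_instance

def pvWitness_task : List String := ["1", "1", "0", "0"]

def Spec_task (array : List String) (out : Int) : Prop := out = task_alt array
instance (array : List String) (out : Int) : Decidable (Spec_task array out) := by unfold Spec_task; infer_instance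

-- ===== CLAIM (what is proved, stated in full; the proofs are below) =====
def Claim_equal_task : Prop := ∀ (array : List String), Dom_task array → Pre_task array → Spec_task array (task array)

-- ===== LEMMAS AND PROOFS =====

-- a fold whose step ignores the range element is an iterate
theorem foldl_range_const_iterate {α : Type} (f : α → α) (k : Nat) (s : α) :
    (List.range k).foldl (fun s _ => f s) s = f^[k] s := by
  induction k generalizing s with
  | zero => rfl
  | succ n ih =>
      rw [List.range_succ, List.foldl_append, ih, Function.iterate_succ_apply']
      rfl

theorem taskStep_iterate_inr (array : List String) (k : Nat) (res : Int) :
    (taskStep array)^[k] (Sum.inr res) = Sum.inr res := by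
  induction k with
  | zero => rfl
  | succ n ih => rw [Function.iterate_succ_apply]; exact ih

-- A's midpoint of [left, left + width] is left plus the half width
theorem mid_eq_half (left : Int) (width : Nat) :
    PySem.Int.floordiv (left + (left + (width : Int))) 2 = left + ((width / 2 : Nat) : Int) := by
  rw [PySem.Int.floordiv_eq_ediv_of_pos (by omega)]
  omega

-- iterating A's loop body from the live state (left, left + width) computes exactly B's
-- recursion on (left, width)
theorem taskStep_iterate_eq_search (array : List String) :
    ∀ (k : Nat) (left : Int) (width : Nat),
      (match (taskStep array)^[k] (Sum.inl (left, left + (width : Int))) with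
        | Sum.inr res => res
        | Sum.inl _ => 0) = taskSearch array k left width := by
  intro k
  induction k with
  | zero => intro left width; rfl
  | succ n ih =>
      intro left width
      rw [Function.iterate_succ_apply]
      have hmid := mid_eq_half left width
      by_cases h1 : PySem.List.pyGet? array (left + ((width / 2 : Nat) : Int)) = some "0"
      · have hs : taskStep array (Sum.inl (left, left + (width : Int)))
            = Sum.inl (left, left + ((width / 2 : Nat) : Int)) := by
          unfold taskStep; dsimp only; rw [hmid, if_pos h1]
        have hB : taskSearch array (n + 1) left width = taskSearch array n left (width / 2) := by
          conv_lhs => rw [taskSearch]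
          rw [if_pos h1]
        rw [hs, hB]; exact ih left (width / 2)
      · by_cases h2 : PySem.List.pyGet? array (left + ((width / 2 : Nat) : Int) + 1) = some "1"
        · have hs : taskStep array (Sum.inl (left, left + (width : Int)))
              = Sum.inl (left + ((width / 2 : Nat) : Int), left + (width : Int)) := by
            unfold taskStep; dsimp only; rw [hmid, if_neg h1, if_pos h2]
          have hB : taskSearch array (n + 1) left width
              = taskSearch array n (left + ((width / 2 : Nat) : Int)) (width - width / 2) := by
            conv_lhs => rw [taskSearch]
            rw [if_neg h1, if_pos h2]
          have hw : left + (width : Int)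
              = left + ((width / 2 : Nat) : Int) + ((width - width / 2 : Nat) : Int) := by omega
          rw [hs, hB, hw]; exact ih _ _
        · have hs : taskStep array (Sum.inl (left, left + (width : Int)))
              = Sum.inr (left + ((width / 2 : Nat) : Int) + 1) := by
            unfold taskStep; dsimp only; rw [hmid, if_neg h1, if_neg h2]
          have hB : taskSearch array (n + 1) left width
              = left + ((width / 2 : Nat) : Int) + 1 := by
            conv_lhs => rw [taskSearch]
            rw [if_neg h1, if_neg h2]
          rw [hs, hB, taskStep_iterate_inr]

-- ===== VERDICT (by name: the statement is the Claim_ definition above) =====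
theorem task_spec : Claim_equal_task := by
  intro array _ _
  unfold Spec_task task task_alt
  have hguard : (array = [] ∨ PySem.List.pyGet? array ((array.length : Int) - 1) = some "1")
      ↔ (array.length = 0 ∨ PySem.List.pyGet? array (-1) = some "1") := by
    cases array with
    | nil => simp
    | cons x xs =>
        have : PySem.List.pyGet? (x :: xs) (((x :: xs).length : Int) - 1)
            = PySem.List.pyGet? (x :: xs) (-1) := by
          simp [PySem.List.pyGet?, PySem.List.pyIdx?]
        rw [this]; simp
  rw [if_congr hguard rfl rfl]
  split_ifs with h1 h2
  · rfl
  · rfl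
  · have hne : array.length ≠ 0 := by
      intro h; exact h1 (Or.inl h)
    have hcast : ((array.length - 1 : Nat) : Int) = (array.length : Int) - 1 := by omega
    rw [foldl_range_const_iterate]
    have := taskStep_iterate_eq_search array array.length 0 (array.length - 1)
    rw [show (0 : Int) + ((array.length - 1 : Nat) : Int) = (array.length : Int) - 1 by omega] at this
    exact this
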